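-- pv_equiv track=rewrite | github.com/muneebaifrah/Unstop-100-Days-Coding-Sprint | Day-46/2.Collecting_Books.py | solve
-- ===== SOURCE A (Python) =====
-- def solve(arr):
--     ans = 0
--     mx = 0
--
--     for x in arr:
--         ans += x
--
--     for i in range(len(arr)):
--         ans += (len(arr) - i) * max(arr[i] - mx, 0)
--         mx = max(mx, arr[i])
--
--     return ans
-- ===== SOURCE B (Python) =====
-- def solve(arr):
--     ans = sum(arr)
--     mx = 0
--     for x in arr:
--         mx = max(mx, x)
--         ans += mx
--     return ans
-- ===== Notes on version B (the rewrite author's own statement) =====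
-- stated objective: simpler
-- what changed: Replaces the (len-i)-weighted positive-increment loop over indices (with list indexing) by Abel summation: sum the array once, then a single structural pass that adds the running maximum at every element.
import Mathlib
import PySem

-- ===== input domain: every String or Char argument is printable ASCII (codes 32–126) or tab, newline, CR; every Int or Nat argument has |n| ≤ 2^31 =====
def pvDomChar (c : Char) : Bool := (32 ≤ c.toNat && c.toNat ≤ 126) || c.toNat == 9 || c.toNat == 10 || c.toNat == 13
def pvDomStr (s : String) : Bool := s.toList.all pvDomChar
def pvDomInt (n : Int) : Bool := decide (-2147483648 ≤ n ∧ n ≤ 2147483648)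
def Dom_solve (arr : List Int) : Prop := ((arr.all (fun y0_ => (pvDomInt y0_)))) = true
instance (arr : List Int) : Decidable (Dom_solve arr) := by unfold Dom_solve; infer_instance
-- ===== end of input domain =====

-- B replaces A's (len-i)-weighted positive-increment index loop by a single pass adding the running maximum (Abel summation); objective: simpler.


-- ===== PORT A =====
def solve (arr : List Int) : Int :=
  let ans : Int := arr.foldl (fun a x => a + x) 0
  let st := (PySem.List.pyRange 0 (arr.length : Int) 1).foldl
    (fun (p : Int × Int) i =>
      (p.1 + ((arr.length : Int) - i) * max (PySem.List.pyGetD arr i 0 - p.2) 0,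
       max p.2 (PySem.List.pyGetD arr i 0)))
    (ans, 0)
  st.1

-- ===== PORT B =====
def solve_alt (arr : List Int) : Int :=
  let ans : Int := arr.foldl (fun a x => a + x) 0
  let st := arr.foldl (fun (p : Int × Int) x =>
      let mx := max p.2 x
      (p.1 + mx, mx)) (ans, 0)
  st.1

-- ===== PRECONDITION & SPEC =====
def Spec_solve (arr : List Int) (out : Int) : Prop := out = solve_alt arr
instance (arr : List Int) (out : Int) : Decidable (Spec_solve arr out) := by unfold Spec_solve; infer_instance

-- ===== CLAIM (what is proved, stated in full; the proofs are below) =====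
def Claim_equal_solve : Prop := ∀ (arr : List Int), Dom_solve arr → Spec_solve arr (solve arr)

-- ===== LEMMAS AND PROOFS =====

-- structural form of A's index loop (proof helper only)
def loopA (l : List Int) (p : Int × Int) : Int × Int :=
  match l with
  | [] => p
  | x :: xs => loopA xs (p.1 + (1 + (xs.length : Int)) * max (x - p.2) 0, max p.2 x)

-- running-max accumulation (proof helper only)
def runH (l : List Int) (mx : Int) : Int :=
  match l with
  | [] => 0
  | x :: xs => max mx x + runH xs (max mx x)

theorem bridgeA (arr : List Int) : ∀ (j : Nat) (p : Int × Int), j ≤ arr.length →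
    (PySem.List.pyRange (j : Int) (arr.length : Int) 1).foldl
      (fun (p : Int × Int) i =>
        (p.1 + ((arr.length : Int) - i) * max (PySem.List.pyGetD arr i 0 - p.2) 0,
         max p.2 (PySem.List.pyGetD arr i 0)))
      p = loopA (arr.drop j) p := by
  intro j
  induction hn : arr.length - j generalizing j with
  | zero =>
      intro p hj
      have hje : j = arr.length := by omega
      subst hje
      rw [PySem.List.pyRange_one_eq_nil (by omega)]
      simp [List.foldl, loopA]
  | succ n ih =>
      intro p hj
      have hlt : j < arr.length := by omega
      rw [PySem.List.pyRange_one_cons (by exact_mod_cast hlt)]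
      have hget : PySem.List.pyGetD arr (j : Int) 0 = arr[j] := by
        rw [PySem.List.pyGetD_natCast, List.getD_eq_getElem _ _ hlt]
      have hdrop : arr.drop j = arr[j] :: arr.drop (j + 1) := by
        rw [List.drop_eq_getElem_cons hlt]
      have hcast : ((j : Int) + 1) = ((j + 1 : Nat) : Int) := by push_cast; ring
      rw [List.foldl_cons, hcast, ih (j + 1) (by omega) _ (by omega), hdrop]
      simp only [loopA, hget]
      congr 2
      · have : ((arr.drop (j+1)).length : Int) = (arr.length : Int) - (j : Int) - 1 := by
          simp [List.length_drop]; omega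
        rw [this]; ring

theorem loopA_fst (l : List Int) : ∀ (a mx : Int),
    (loopA l (a, mx)).1 = a + runH l mx - (l.length : Int) * mx := by
  induction l with
  | nil => intro a mx; simp [loopA, runH]
  | cons x xs ih =>
      intro a mx
      simp only [loopA, runH, ih]
      have hmax : max (x - mx) 0 = max mx x - mx := by omega
      rw [hmax]
      simp only [List.length_cons]
      push_cast
      ring

theorem foldB_fst (l : List Int) : ∀ (a mx : Int),
    (l.foldl (fun (p : Int × Int) x =>
      let m := max p.2 x
      (p.1 + m, m)) (a, mx)).1 = a + runH l mx := by
  induction l with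
  | nil => intro a mx; simp [runH]
  | cons x xs ih =>
      intro a mx
      simp only [List.foldl_cons, runH, ih]
      ring

theorem bridgeA0 (arr : List Int) (p : Int × Int) :
    (PySem.List.pyRange 0 (arr.length : Int) 1).foldl
      (fun (p : Int × Int) i =>
        (p.1 + ((arr.length : Int) - i) * max (PySem.List.pyGetD arr i 0 - p.2) 0,
         max p.2 (PySem.List.pyGetD arr i 0)))
      p = loopA arr p := by
  have h := bridgeA arr 0 p (Nat.zero_le _)
  simpa using h

-- ===== VERDICT (by name: the statement is the Claim_ definition above) =====
theorem solve_spec : Claim_equal_solve := by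
  intro arr _
  simp only [Spec_solve, solve, solve_alt]
  rw [bridgeA0, loopA_fst, foldB_fst]
  ring
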